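-- pv_equiv track=rewrite | github.com/valescamoura/banco-de-dados-em-python | Trabalho.py | formatar
-- ===== SOURCE A (Python) =====
-- def formatar(lista) -> list:
--     for i in range(4):
--         maior = 0
--         for j in range(len(lista)):
--             if len(lista[j][i]) > maior:
--                 maior = len(lista[j][i])
--         for z in range(len(lista)):
--             if len(lista[z][i]) != maior:
--                 lista[z][i] = lista[z][i] + ' '*(maior-len(lista[z][i]))
--     return lista
-- ===== SOURCE B (Python) =====
-- def formatar(lista) -> list:
--     # Online single pass: keep the already-seen rows fully formatted; when a new
--     # row widens some column, re-pad the formatted prefix to the new widths.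
--     # Builds and returns a new list (A mutates lista in place; the equivalence
--     # claimed is about the return value).
--     def pad(row, widths):
--         return [c + ' ' * (widths[i] - len(c)) if i < 4 else c
--                 for i, c in enumerate(row)]
--     widths = [0, 0, 0, 0]
--     out = []
--     for row in lista:
--         new = [max(w, len(row[i])) for i, w in enumerate(widths)]
--         if new != widths:
--             out = [pad(r, new) for r in out]
--             widths = new
--         out.append(pad(row, widths))
--     return out
-- ===== Notes on version B (the rewrite author's own statement) =====
-- stated objective: alternative
-- what changed: B is an online single pass that keeps the prefix of already-seen rows fully formatted and re-pads that prefix whenever a new row enlarges a column width, instead of A's offline column-at-a-time scheme that scans the whole finished list twice per column; B builds a new list while A mutates in place (return values agree).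
import Mathlib
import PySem

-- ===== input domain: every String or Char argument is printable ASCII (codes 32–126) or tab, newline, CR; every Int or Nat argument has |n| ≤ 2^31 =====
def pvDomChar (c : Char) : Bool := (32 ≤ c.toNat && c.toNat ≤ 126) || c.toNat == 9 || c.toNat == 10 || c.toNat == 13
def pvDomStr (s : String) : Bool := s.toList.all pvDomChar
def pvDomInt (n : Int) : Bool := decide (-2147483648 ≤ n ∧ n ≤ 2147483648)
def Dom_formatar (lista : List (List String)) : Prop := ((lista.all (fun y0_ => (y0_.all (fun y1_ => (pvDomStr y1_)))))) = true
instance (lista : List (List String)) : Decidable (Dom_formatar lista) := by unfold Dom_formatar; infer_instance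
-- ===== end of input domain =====

-- B formats online in ONE pass (keeps the seen prefix formatted, re-pads it when a column widens)
-- instead of A's column-at-a-time triple loop; A mutates `lista` in place and returns it, B builds
-- a new list — the equivalence proved here is about the return value.

-- ===== PORT A =====
-- 's + " "*(n)' has no PySem primitive; ported by hand as String.ofList (s.toList ++ List.replicate n ' ') — exact for n = (maior-len).toNat since Python's result for n ≤ 0 is ''.
def formatar (lista : List (List String)) : List (List String) :=
  (PySem.List.pyRange 0 4 1).foldl (fun acc i =>
    let maior : Int :=
      (PySem.List.pyRange 0 (PySem.List.len acc) 1).foldl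
        (fun maior j =>
          if PySem.Str.len (PySem.List.pyGetD (PySem.List.pyGetD acc j []) i "") > maior
          then PySem.Str.len (PySem.List.pyGetD (PySem.List.pyGetD acc j []) i "")
          else maior) 0
    (PySem.List.pyRange 0 (PySem.List.len acc) 1).foldl
      (fun cur z =>
        if PySem.Str.len (PySem.List.pyGetD (PySem.List.pyGetD cur z []) i "") ≠ maior
        then PySem.List.pySetD cur z
               (PySem.List.pySetD (PySem.List.pyGetD cur z []) i
                 (String.ofList ((PySem.List.pyGetD (PySem.List.pyGetD cur z []) i "").toList ++
                    List.replicate (maior - PySem.Str.len (PySem.List.pyGetD (PySem.List.pyGetD cur z []) i "")).toNat ' ')))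
        else cur) acc) lista

-- ===== PORT B =====
-- Source B's helper 'pad(row, widths)': per cell, 'c + " "*(widths[i]-len(c))' for i < 4, untouched beyond.
def padB (row : List String) (widths : List Int) : List String :=
  (PySem.List.enumerate row).map (fun p =>
    if p.1 < 4 then
      String.ofList (p.2.toList ++
        List.replicate (PySem.List.pyGetD widths p.1 0 - PySem.Str.len p.2).toNat ' ')
    else p.2)

-- the loop body of Source B: state = (widths, out)
def stepB (st : List Int × List (List String)) (row : List String) : List Int × List (List String) :=
  let nw := (PySem.List.enumerate st.1).map (fun p =>
    max p.2 (PySem.Str.len (PySem.List.pyGetD row p.1 "")))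
  if nw ≠ st.1 then (nw, (st.2.map (fun r => padB r nw)) ++ [padB row nw])
  else (st.1, st.2 ++ [padB row st.1])

def formatar_alt (lista : List (List String)) : List (List String) :=
  (lista.foldl stepB ([0, 0, 0, 0], [])).2

-- ===== PRECONDITION & SPEC =====
-- Pre_ excludes exactly the rows-too-short inputs: Python A raises IndexError on lista[j][i] when some row has fewer than 4 cells (so does B).
def Pre_formatar (lista : List (List String)) : Prop := ∀ row ∈ lista, 4 ≤ row.length
instance (lista : List (List String)) : Decidable (Pre_formatar lista) := by unfold Pre_formatar; infer_instance
def pvWitness_formatar : List (List String) := [["a", "bb", "", "dd"], ["xxx", "", "c", "d"]]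

def Spec_formatar (lista : List (List String)) (out : List (List String)) : Prop := out = formatar_alt lista
instance (lista : List (List String)) (out : List (List String)) : Decidable (Spec_formatar lista out) := by unfold Spec_formatar; infer_instance

-- ===== CLAIM (what is proved, stated in full; the proofs are below) =====
def Claim_equal_formatar : Prop := ∀ (lista : List (List String)), Dom_formatar lista → Pre_formatar lista → Spec_formatar lista (formatar lista)

-- ===== LEMMAS AND PROOFS =====

-- cell length at column i, as A reads it
def leni (i : Int) (row : List String) : Int := PySem.Str.len (PySem.List.pyGetD row i "")

-- one padded cell: c + ' '*(w - len c)
def padCell (w : Int) (c : String) : String :=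
  String.ofList (c.toList ++ List.replicate (w - PySem.Str.len c).toNat ' ')

-- A's per-column maximum loop, folded directly over the rows
def colMaxA (i : Int) (xs : List (List String)) (m0 : Int) : Int :=
  xs.foldl (fun m row => if leni i row > m then leni i row else m) m0

-- the four column maxima of a block
def W (xs : List (List String)) : List Int :=
  [colMaxA 0 xs 0, colMaxA 1 xs 0, colMaxA 2 xs 0, colMaxA 3 xs 0]

-- A's per-row update for column i at target width w
def rowStepA (i : Int) (w : Int) (row : List String) : List String :=
  if leni i row ≠ w then
    PySem.List.pySetD row i
      (String.ofList ((PySem.List.pyGetD row i "").toList ++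
        List.replicate (w - leni i row).toNat ' '))
  else row

-- A's whole body for one column
def stepA (i : Int) (acc : List (List String)) : List (List String) :=
  acc.map (rowStepA i (colMaxA i acc 0))

-- set-based form of A's per-row update
def rowStepB (i : Nat) (w : Int) (row : List String) : List String :=
  row.set i (padCell w (row.getD i ""))

lemma length_rowStepA (i w : Int) (row : List String) :
    (rowStepA i w row).length = row.length := by
  unfold rowStepA; split_ifs <;> simp [PySem.List.length_pySetD]

lemma set_append_len {α : Type} : ∀ (pre : List α) (a v : α) (suf : List α),
    (pre ++ a :: suf).set pre.length v = pre ++ v :: suf := by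
  intro pre
  induction pre with
  | nil => intros; rfl
  | cons x p ih => intro a v suf; simp [ih a v suf]

-- (generic) a loop 'for k in range(len(xs)): if P(xs[k]): xs[k] = h(xs[k])' is a map
lemma foldl_setloop {α : Type} (P : α → Prop) [DecidablePred P] (h : α → α) (d : α) :
    ∀ (suf pre : List α),
    ((List.range suf.length).map (fun k => pre.length + k)).foldl
      (fun cur k => if P (cur.getD k d) then cur.set k (h (cur.getD k d)) else cur) (pre ++ suf)
    = pre ++ suf.map (fun x => if P x then h x else x) := by
  intro suf
  induction suf with
  | nil => intro pre; simp
  | cons a suf ih =>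
    intro pre
    have hget : (pre ++ a :: suf).getD pre.length d = a := by
      simp [List.getD]
    have hset : ∀ v, (pre ++ a :: suf).set pre.length v = pre ++ v :: suf :=
      fun v => set_append_len pre a v suf
    rw [List.length_cons, List.range_succ_eq_map]
    simp only [List.map_cons, List.map_map, List.foldl_cons, Nat.add_zero, hget]
    set b := if P a then h a else a with hb
    have hstep : (if P a then (pre ++ a :: suf).set pre.length (h a) else pre ++ a :: suf)
        = (pre ++ [b]) ++ suf := by
      rw [hb]; split_ifs with hc <;> simp [hset]
    rw [hstep]
    have hidx : ((List.range suf.length).map ((fun k => pre.length + k) ∘ Nat.succ))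
        = (List.range suf.length).map (fun k => (pre ++ [b]).length + k) := by
      apply List.map_congr_left; intro k _; simp; omega
    rw [hidx, ih (pre ++ [b])]
    simp [hb]

-- A's inner z-loop (Int indices via pyRange/pyGetD/pySetD) is the same map
lemma setloop_int {α : Type} (P : α → Prop) [DecidablePred P] (h : α → α) (d : α)
    (xs : List α) :
    (PySem.List.pyRange 0 (PySem.List.len xs) 1).foldl
      (fun cur z => if P (PySem.List.pyGetD cur z d)
        then PySem.List.pySetD cur z (h (PySem.List.pyGetD cur z d)) else cur) xs
    = xs.map (fun x => if P x then h x else x) := by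
  have h0 := foldl_setloop P h d xs []
  simp only [List.nil_append, List.length_nil, Nat.zero_add, List.map_id'] at h0
  rw [PySem.List.pyRange_one]
  simp only [PySem.List.len_eq]
  rw [List.foldl_map]
  rw [show (((xs.length : Int)) - 0).toNat = xs.length by simp]
  rw [PySem.List.foldl_congr_mem (List.range xs.length) _
        (fun cur k => if P (cur.getD k d) then cur.set k (h (cur.getD k d)) else cur) xs
        (by intro acc k _; simp [PySem.List.pyGetD_natCast, PySem.List.pySetD_natCast])]
  exact h0

-- A's maior loop equals colMaxA
lemma maior_eq (i : Int) (acc : List (List String)) :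
    (PySem.List.pyRange 0 (PySem.List.len acc) 1).foldl
      (fun maior j =>
        if PySem.Str.len (PySem.List.pyGetD (PySem.List.pyGetD acc j []) i "") > maior
        then PySem.Str.len (PySem.List.pyGetD (PySem.List.pyGetD acc j []) i "")
        else maior) 0 = colMaxA i acc 0 := by
  exact PySem.List.foldl_pyRange_zero_pyGetD acc []
    (fun m row => if leni i row > m then leni i row else m) 0

-- A's column lambda, named for the proofs (identical text to the lambda in `formatar`)
def colBody (acc : List (List String)) (i : Int) : List (List String) :=
  let maior : Int :=
    (PySem.List.pyRange 0 (PySem.List.len acc) 1).foldl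
      (fun maior j =>
        if PySem.Str.len (PySem.List.pyGetD (PySem.List.pyGetD acc j []) i "") > maior
        then PySem.Str.len (PySem.List.pyGetD (PySem.List.pyGetD acc j []) i "")
        else maior) 0
  (PySem.List.pyRange 0 (PySem.List.len acc) 1).foldl
    (fun cur z =>
      if PySem.Str.len (PySem.List.pyGetD (PySem.List.pyGetD cur z []) i "") ≠ maior
      then PySem.List.pySetD cur z
             (PySem.List.pySetD (PySem.List.pyGetD cur z []) i
               (String.ofList ((PySem.List.pyGetD (PySem.List.pyGetD cur z []) i "").toList ++
                  List.replicate (maior - PySem.Str.len (PySem.List.pyGetD (PySem.List.pyGetD cur z []) i "")).toNat ' ')))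
      else cur) acc

lemma colBody_eq (acc : List (List String)) (i : Int) : colBody acc i = stepA i acc := by
  unfold colBody
  simp only [maior_eq]
  exact setloop_int
    (fun row => PySem.Str.len (PySem.List.pyGetD row i "") ≠ colMaxA i acc 0)
    (fun row => PySem.List.pySetD row i
      (String.ofList ((PySem.List.pyGetD row i "").toList ++
        List.replicate (colMaxA i acc 0 - PySem.Str.len (PySem.List.pyGetD row i "")).toNat ' ')))
    [] acc

-- formatar as four stepA stages
lemma formatar_eq_steps (lista : List (List String)) :
    formatar lista = stepA 3 (stepA 2 (stepA 1 (stepA 0 lista))) := by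
  have h0 : formatar lista = ([0, 1, 2, 3] : List Int).foldl colBody lista := by
    unfold formatar colBody
    rw [show PySem.List.pyRange 0 4 1 = [0, 1, 2, 3] from by decide]
  rw [h0]
  simp only [List.foldl_cons, List.foldl_nil, colBody_eq]

-- lengths of rows are preserved by stepA
lemma mem_stepA_length (i : Int) (acc : List (List String))
    (hl : ∀ row ∈ acc, 4 ≤ row.length) :
    ∀ row ∈ stepA i acc, 4 ≤ row.length := by
  intro row hrow
  unfold stepA at hrow
  obtain ⟨r, hr, rfl⟩ := List.mem_map.1 hrow
  rw [length_rowStepA]; exact hl r hr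

-- leni at column i is unchanged by rowStepA at a different column j
lemma leni_rowStepA_ne (i j w : Int) (row : List String)
    (hi0 : 0 ≤ i) (hj0 : 0 ≤ j) (hi : i < 4) (hj : j < 4)
    (hne : i ≠ j) (_hl : 4 ≤ row.length) :
    leni i (rowStepA j w row) = leni i row := by
  unfold rowStepA
  split_ifs with hc
  · have hi' : i = ((i.toNat : Nat) : Int) := by omega
    have hj' : j = ((j.toNat : Nat) : Int) := by omega
    unfold leni
    rw [PySem.List.pySetD_of_nonneg]
    rw [hi', PySem.List.pyGetD_natCast, PySem.List.pyGetD_natCast]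
    have hne' : j.toNat ≠ i.toNat := by omega
    simp [List.getD, List.getElem?_set_ne hne']
    exact hj0
  · rfl

-- colMaxA at column i is unchanged by a stepA pass at a different column j
lemma colMaxA_stepA_ne (i j : Int) (acc : List (List String))
    (hi0 : 0 ≤ i) (hj0 : 0 ≤ j) (hi : i < 4) (hj : j < 4) (hne : i ≠ j)
    (hl : ∀ row ∈ acc, 4 ≤ row.length) :
    colMaxA i (stepA j acc) 0 = colMaxA i acc 0 := by
  unfold colMaxA stepA
  rw [List.foldl_map]
  exact PySem.List.foldl_congr_mem acc _ _ 0 (by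
    intro m row hrow
    rw [leni_rowStepA_ne i j _ row hi0 hj0 hi hj hne (hl row hrow)])

-- per-cell: A's conditional padding = the set-based padCell update (same column, in range)
lemma rowStepA_eq_rowStepB (i : Nat) (w : Int) (row : List String) (hi : i < row.length) :
    rowStepA (i : Int) w row = rowStepB i w row := by
  unfold rowStepA rowStepB leni padCell
  rw [PySem.List.pyGetD_natCast, PySem.List.pySetD_natCast]
  rw [List.getD_eq_getElem row "" hi]
  split_ifs with hc
  · rfl
  · rw [not_not] at hc
    rw [← hc]
    simp [String.ofList_toList, List.set_getElem_self]

lemma length_rowStepB (i : Nat) (w : Int) (row : List String) :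
    (rowStepB i w row).length = row.length := by
  unfold rowStepB; simp

lemma getD_set_ne {i j : Nat} (h : i ≠ j) (l : List String) (v : String) :
    (l.set i v).getD j "" = l.getD j "" := by
  simp [List.getD, List.getElem?_set_ne h]

-- basic facts about padB
lemma length_padB (r : List String) (ws : List Int) : (padB r ws).length = r.length := by
  unfold padB; simp [PySem.List.length_enumerate]

lemma getElem_padB (r : List String) (ws : List Int) (k : Nat) (hk : k < r.length)
    (hk' : k < (padB r ws).length) :
    (padB r ws)[k] =
      if (k : Int) < 4 then padCell (PySem.List.pyGetD ws (k : Int) 0) r[k] else r[k] := by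
  unfold padB padCell
  simp [PySem.List.getElem_enumerate]

-- composing pads: if len c ≤ a ≤ b then padding to a then to b = padding to b
lemma padCell_comp (a b : Int) (c : String)
    (h1 : PySem.Str.len c ≤ a) (h2 : a ≤ b) :
    padCell b (padCell a c) = padCell b c := by
  unfold padCell
  simp only [PySem.Str.len_eq] at h1
  simp [PySem.Str.len_eq, List.append_assoc]
  congr 2
  omega

-- the composition of A's four per-row updates is Source B's pad (rows of length ≥ 4)
lemma rowSteps_eq_padB (w0 w1 w2 w3 : Int) (row : List String) (hl : 4 ≤ row.length) :
    rowStepA 3 w3 (rowStepA 2 w2 (rowStepA 1 w1 (rowStepA 0 w0 row)))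
      = padB row [w0, w1, w2, w3] := by
  have e0 : rowStepA 0 w0 row = rowStepB 0 w0 row := by
    have := rowStepA_eq_rowStepB 0 w0 row (by omega); simpa using this
  have L0 : (rowStepB 0 w0 row).length = row.length := length_rowStepB _ _ _
  have e1 : rowStepA 1 w1 (rowStepB 0 w0 row) = rowStepB 1 w1 (rowStepB 0 w0 row) := by
    have := rowStepA_eq_rowStepB 1 w1 (rowStepB 0 w0 row) (by omega); simpa using this
  have L1 : (rowStepB 1 w1 (rowStepB 0 w0 row)).length = row.length := by
    rw [length_rowStepB, L0]
  have e2 : rowStepA 2 w2 (rowStepB 1 w1 (rowStepB 0 w0 row))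
      = rowStepB 2 w2 (rowStepB 1 w1 (rowStepB 0 w0 row)) := by
    have := rowStepA_eq_rowStepB 2 w2 (rowStepB 1 w1 (rowStepB 0 w0 row)) (by omega)
    simpa using this
  have L2 : (rowStepB 2 w2 (rowStepB 1 w1 (rowStepB 0 w0 row))).length = row.length := by
    rw [length_rowStepB, L1]
  have e3 : rowStepA 3 w3 (rowStepB 2 w2 (rowStepB 1 w1 (rowStepB 0 w0 row)))
      = rowStepB 3 w3 (rowStepB 2 w2 (rowStepB 1 w1 (rowStepB 0 w0 row))) := by
    have := rowStepA_eq_rowStepB 3 w3 (rowStepB 2 w2 (rowStepB 1 w1 (rowStepB 0 w0 row)))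
      (by omega)
    simpa using this
  rw [e0, e1, e2, e3]
  -- collapse the getD's of intermediate lists back to row
  have hform : rowStepB 3 w3 (rowStepB 2 w2 (rowStepB 1 w1 (rowStepB 0 w0 row)))
      = (((row.set 0 (padCell w0 (row.getD 0 ""))).set 1
            (padCell w1 (row.getD 1 ""))).set 2
            (padCell w2 (row.getD 2 ""))).set 3
            (padCell w3 (row.getD 3 "")) := by
    unfold rowStepB
    rw [getD_set_ne (show (0:Nat) ≠ 1 by omega),
        getD_set_ne (show (1:Nat) ≠ 2 by omega), getD_set_ne (show (0:Nat) ≠ 2 by omega),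
        getD_set_ne (show (2:Nat) ≠ 3 by omega), getD_set_ne (show (1:Nat) ≠ 3 by omega),
        getD_set_ne (show (0:Nat) ≠ 3 by omega)]
  have d0 : row.getD 0 "" = row[0]'(by omega) := List.getD_eq_getElem _ _ (by omega)
  have d1 : row.getD 1 "" = row[1]'(by omega) := List.getD_eq_getElem _ _ (by omega)
  have d2 : row.getD 2 "" = row[2]'(by omega) := List.getD_eq_getElem _ _ (by omega)
  have d3 : row.getD 3 "" = row[3]'(by omega) := List.getD_eq_getElem _ _ (by omega)
  rw [d0, d1, d2, d3] at hform
  rw [hform]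
  apply List.ext_getElem
  · simp [length_padB]
  · intro k hkL hkR
    have hk : k < row.length := by
      rw [length_padB] at hkR; exact hkR
    rw [getElem_padB row _ k hk hkR]
    by_cases h0 : k = 0
    · subst h0
      simp [PySem.List.pyGetD_ofNat']
    · by_cases h1 : k = 1
      · subst h1
        simp [PySem.List.pyGetD_ofNat']
      · by_cases h2 : k = 2
        · subst h2
          simp [PySem.List.pyGetD_ofNat']
        · by_cases h3 : k = 3
          · subst h3
            simp [PySem.List.pyGetD_ofNat']
          · have hk4 : ¬ ((k : Int) < 4) := by omega
            have n0 : ¬ (0 = k) := by omega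
            have n1 : ¬ (1 = k) := by omega
            have n2 : ¬ (2 = k) := by omega
            have n3 : ¬ (3 = k) := by omega
            simp [n0, n1, n2, n3, hk4]

-- colMaxA over an appended row is a max
lemma colMaxA_append (i : Int) (p : List (List String)) (row : List String) :
    colMaxA i (p ++ [row]) 0 = max (colMaxA i p 0) (leni i row) := by
  unfold colMaxA
  rw [List.foldl_append]
  simp only [List.foldl_cons, List.foldl_nil]
  split_ifs <;> omega

-- the initial value is ≤ the column max
lemma colMaxA_init_le (i : Int) : ∀ (xs : List (List String)) (m0 : Int), m0 ≤ colMaxA i xs m0 := by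
  intro xs
  induction xs with
  | nil => intro m0; simp [colMaxA]
  | cons a t ih =>
    intro m0
    unfold colMaxA at *
    rw [List.foldl_cons]
    have := ih (if leni i a > m0 then leni i a else m0)
    split_ifs at this ⊢ <;> omega

-- each row's cell length is ≤ the column max
lemma leni_le_colMaxA (i : Int) : ∀ (xs : List (List String)) (m0 : Int) (r : List String),
    r ∈ xs → leni i r ≤ colMaxA i xs m0 := by
  intro xs
  induction xs with
  | nil => intro m0 r hr; cases hr
  | cons a t ih =>
    intro m0 r hr
    rcases List.mem_cons.1 hr with h | h
    · subst h
      unfold colMaxA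
      rw [List.foldl_cons]
      by_cases hc : leni i r > m0
      · rw [if_pos hc]
        simpa [colMaxA] using colMaxA_init_le i t (leni i r)
      · rw [if_neg hc]
        exact le_trans (show leni i r ≤ m0 by omega) (by simpa [colMaxA] using colMaxA_init_le i t m0)
    · unfold colMaxA
      rw [List.foldl_cons]
      exact ih _ r h

-- Source B's width update evaluated on a 4-list of widths
lemma nw_eval (m0 m1 m2 m3 : Int) (row : List String) :
    (PySem.List.enumerate [m0, m1, m2, m3]).map (fun p =>
        max p.2 (PySem.Str.len (PySem.List.pyGetD row p.1 "")))
      = [max m0 (leni 0 row), max m1 (leni 1 row), max m2 (leni 2 row), max m3 (leni 3 row)] := by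
  simp [PySem.List.enumerate, leni]

-- W over an appended row
lemma W_append (p : List (List String)) (row : List String) :
    W (p ++ [row]) = [max (colMaxA 0 p 0) (leni 0 row), max (colMaxA 1 p 0) (leni 1 row),
                      max (colMaxA 2 p 0) (leni 2 row), max (colMaxA 3 p 0) (leni 3 row)] := by
  unfold W
  rw [colMaxA_append, colMaxA_append, colMaxA_append, colMaxA_append]

-- re-padding an already padded row to wider widths = padding the original row once
lemma padB_padB (r : List String) (A B : List Int)
    (h : ∀ (k : Nat), k < r.length → (k : Int) < 4 →
      PySem.Str.len r[k]! ≤ PySem.List.pyGetD A (k : Int) 0 ∧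
      PySem.List.pyGetD A (k : Int) 0 ≤ PySem.List.pyGetD B (k : Int) 0) :
    padB (padB r A) B = padB r B := by
  apply List.ext_getElem
  · rw [length_padB, length_padB, length_padB]
  · intro k hkL hkR
    have hk : k < r.length := by rw [length_padB] at hkR; exact hkR
    have hk' : k < (padB r A).length := by rw [length_padB]; exact hk
    rw [getElem_padB (padB r A) B k hk' hkL, getElem_padB r A k hk hk',
        getElem_padB r B k hk hkR]
    by_cases h4 : (k : Int) < 4
    · obtain ⟨ha, hb⟩ := h k hk h4
      rw [List.getElem!_eq_getElem?_getD, List.getElem?_eq_getElem hk] at ha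
      simp only [h4, if_true, Option.getD_some] at ha ⊢
      exact padCell_comp _ _ _ ha hb
    · simp [h4]

-- the loop invariant: after consuming xs from a formatted prefix p, the state is
-- (widths of p++xs, p++xs each padded to those widths)
lemma loop_inv : ∀ (xs p : List (List String)),
    (∀ row ∈ p ++ xs, 4 ≤ row.length) →
    xs.foldl stepB (W p, p.map (fun r => padB r (W p)))
      = (W (p ++ xs), (p ++ xs).map (fun r => padB r (W (p ++ xs)))) := by
  intro xs
  induction xs with
  | nil => intro p _; simp
  | cons x t ih =>
    intro p hlen
    rw [List.foldl_cons]
    have hWp : W p = [colMaxA 0 p 0, colMaxA 1 p 0, colMaxA 2 p 0, colMaxA 3 p 0] := rfl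
    have hnw : (PySem.List.enumerate (W p)).map (fun q =>
        max q.2 (PySem.Str.len (PySem.List.pyGetD x q.1 ""))) = W (p ++ [x]) := by
      rw [hWp, nw_eval, W_append]
    have hstep : stepB (W p, p.map (fun r => padB r (W p))) x
        = (W (p ++ [x]), (p ++ [x]).map (fun r => padB r (W (p ++ [x])))) := by
      unfold stepB
      simp only [hnw]
      by_cases heq : W (p ++ [x]) = W p
      · rw [if_neg (by simp [heq]), heq]
        simp
      · rw [if_pos (by simp [heq])]
        have hrepad : (p.map (fun r => padB r (W p))).map (fun r => padB r (W (p ++ [x])))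
            = p.map (fun r => padB r (W (p ++ [x]))) := by
          rw [List.map_map]
          apply List.map_congr_left
          intro r hr
          show padB (padB r (W p)) (W (p ++ [x])) = padB r (W (p ++ [x]))
          apply padB_padB
          intro k hk h4
          have hkk : k < 4 := by omega
          have hlen_eq : PySem.Str.len r[k]! = leni (k : Int) r := by
            unfold leni
            rw [PySem.List.pyGetD_natCast]
            rw [List.getElem!_eq_getElem?_getD, List.getElem?_eq_getElem hk,
                List.getD_eq_getElem r "" hk]
            rfl
          have hmem : r ∈ p := hr
          constructor
          · rw [hlen_eq]
            have hle := leni_le_colMaxA (k : Int) p 0 r hmem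
            rw [hWp, PySem.List.pyGetD_natCast]
            interval_cases k <;> simpa using hle
          · rw [W_append, hWp, PySem.List.pyGetD_natCast, PySem.List.pyGetD_natCast]
            interval_cases k <;> simp
        rw [hrepad]
        simp
    rw [hstep]
    have hassoc : p ++ x :: t = (p ++ [x]) ++ t := by simp
    rw [hassoc] at hlen ⊢
    exact ih (p ++ [x]) hlen

-- B computes: every row padded to the final widths
lemma formatar_alt_eq (lista : List (List String)) (hlen : ∀ row ∈ lista, 4 ≤ row.length) :
    formatar_alt lista = lista.map (fun r => padB r (W lista)) := by
  unfold formatar_alt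
  have h0 : (([0, 0, 0, 0] : List Int), ([] : List (List String)))
      = (W [], ([] : List (List String)).map (fun r => padB r (W []))) := by
    simp [W, colMaxA]
  rw [h0, loop_inv lista [] (by simpa using hlen)]
  simp

-- ===== VERDICT (by name: the statement is the Claim_ definition above) =====
theorem formatar_spec : Claim_equal_formatar := by
  intro lista _ hpre
  unfold Pre_formatar at hpre
  unfold Spec_formatar
  rw [formatar_eq_steps]
  have h1 : ∀ row ∈ stepA 0 lista, 4 ≤ row.length := mem_stepA_length 0 lista hpre
  have h2 : ∀ row ∈ stepA 1 (stepA 0 lista), 4 ≤ row.length := mem_stepA_length _ _ h1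
  have c1 : colMaxA 1 (stepA 0 lista) 0 = colMaxA 1 lista 0 :=
    colMaxA_stepA_ne 1 0 lista (by norm_num) (by norm_num) (by norm_num) (by norm_num)
      (by norm_num) hpre
  have c2 : colMaxA 2 (stepA 1 (stepA 0 lista)) 0 = colMaxA 2 lista 0 := by
    rw [colMaxA_stepA_ne 2 1 _ (by norm_num) (by norm_num) (by norm_num) (by norm_num)
          (by norm_num) h1,
        colMaxA_stepA_ne 2 0 _ (by norm_num) (by norm_num) (by norm_num) (by norm_num)
          (by norm_num) hpre]
  have c3 : colMaxA 3 (stepA 2 (stepA 1 (stepA 0 lista))) 0 = colMaxA 3 lista 0 := by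
    rw [colMaxA_stepA_ne 3 2 _ (by norm_num) (by norm_num) (by norm_num) (by norm_num)
          (by norm_num) h2,
        colMaxA_stepA_ne 3 1 _ (by norm_num) (by norm_num) (by norm_num) (by norm_num)
          (by norm_num) h1,
        colMaxA_stepA_ne 3 0 _ (by norm_num) (by norm_num) (by norm_num) (by norm_num)
          (by norm_num) hpre]
  have hA : stepA 3 (stepA 2 (stepA 1 (stepA 0 lista)))
      = lista.map (fun row =>
          rowStepA 3 (colMaxA 3 lista 0)
            (rowStepA 2 (colMaxA 2 lista 0)
              (rowStepA 1 (colMaxA 1 lista 0)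
                (rowStepA 0 (colMaxA 0 lista 0) row)))) := by
    conv_lhs => rw [show stepA 3 (stepA 2 (stepA 1 (stepA 0 lista)))
        = (stepA 2 (stepA 1 (stepA 0 lista))).map
            (rowStepA 3 (colMaxA 3 (stepA 2 (stepA 1 (stepA 0 lista))) 0)) from rfl,
      c3,
      show stepA 2 (stepA 1 (stepA 0 lista))
        = (stepA 1 (stepA 0 lista)).map
            (rowStepA 2 (colMaxA 2 (stepA 1 (stepA 0 lista)) 0)) from rfl,
      c2,
      show stepA 1 (stepA 0 lista)
        = (stepA 0 lista).map (rowStepA 1 (colMaxA 1 (stepA 0 lista) 0)) from rfl,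
      c1,
      show stepA 0 lista = lista.map (rowStepA 0 (colMaxA 0 lista 0)) from rfl]
    simp [List.map_map, Function.comp_def]
  rw [hA, formatar_alt_eq lista hpre]
  apply List.map_congr_left
  intro row hrow
  exact rowSteps_eq_padB _ _ _ _ row (hpre row hrow)
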